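-- pv_equiv track=rewrite | github.com/jonsimonsen/Chi-poker | dealhand.py | findStraight
-- ===== SOURCE A (Python) =====
-- def findStraight(hand):
--     # Check for ordinary straight
--     bitmask = 0b11111
--     for i in reversed(range(9)):
--         if (hand & (bitmask << i)) == (bitmask << i):
--             return 8 - i
--     # Check for wheel
--     bitmask = 0b1111
--     if (hand & bitmask) == bitmask:
--         if hand & (1 << 12):
--             return 9
--     return None
-- ===== SOURCE B (Python) =====
-- def findStraight(hand):
--     h = hand & 0x1FFF  # only the 13 rank bits matter
--     m = h & (h >> 1) & (h >> 2) & (h >> 3) & (h >> 4)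
--     if m:
--         return 8 - (m.bit_length() - 1)
--     if (h & 0b1111) == 0b1111 and (h & (1 << 12)):
--         return 9
--     return None
-- ===== Notes on version B (the rewrite author's own statement) =====
-- stated objective: alternative
-- what changed: Replaces A's nine-iteration sliding-window scan over shifted five-bit masks with a single bit-parallel AND (h & h>>1 & h>>2 & h>>3 & h>>4) whose highest set bit, read off via bit_length, directly gives the best straight.
import Mathlib
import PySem

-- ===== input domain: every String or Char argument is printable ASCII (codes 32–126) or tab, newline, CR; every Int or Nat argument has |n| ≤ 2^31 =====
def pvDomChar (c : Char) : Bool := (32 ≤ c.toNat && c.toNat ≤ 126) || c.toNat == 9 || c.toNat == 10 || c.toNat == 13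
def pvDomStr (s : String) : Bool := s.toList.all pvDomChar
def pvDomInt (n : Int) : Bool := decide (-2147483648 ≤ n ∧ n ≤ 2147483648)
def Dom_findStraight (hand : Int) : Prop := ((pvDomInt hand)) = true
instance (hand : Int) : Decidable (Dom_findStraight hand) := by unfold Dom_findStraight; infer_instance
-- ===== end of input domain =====

-- B replaces A's nine-step sliding-window scan by one bit-parallel AND (h & h>>1 & ... & h>>4) plus a
-- bit_length lookup of the highest straight; objective: alternative (same cost on 13-bit inputs).

-- ===== PORT A =====
-- the loop 'for i in reversed(range(9)): if (hand & (31 << i)) == (31 << i): return 8 - i'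
def fsLoop (hand : Int) : List Int → Option Int
  | [] => none
  | i :: rest =>
    if PySem.Int.band hand (31 <<< i.toNat) = 31 <<< i.toNat then some (8 - i)
    else fsLoop hand rest

def findStraight (hand : Int) : Option Int :=
  match fsLoop hand ((PySem.List.pyRange 0 9 1).reverse) with
  | some r => some r
  | none =>
    if PySem.Int.band hand 15 = 15 then
      if PySem.Int.band hand 4096 ≠ 0 then some 9 else none
    else none


-- ===== PORT B =====
-- Source B: h = hand & 0x1FFF; m = h & h>>1 & h>>2 & h>>3 & h>>4;
-- if m: 8 - (m.bit_length() - 1); else the wheel check on h; bitLength = Python's int.bit_length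
def findStraight_alt (hand : Int) : Option Int :=
  let h := PySem.Int.band hand 8191
  let m := PySem.Int.band (PySem.Int.band (PySem.Int.band (PySem.Int.band h (h >>> 1)) (h >>> 2)) (h >>> 3)) (h >>> 4)
  if m ≠ 0 then some (8 - ((PySem.Int.bitLength m : Int) - 1))
  else if PySem.Int.band h 15 = 15 ∧ PySem.Int.band h 4096 ≠ 0 then some 9
  else none

-- ===== PRECONDITION & SPEC =====
def Spec_findStraight (hand : Int) (out : Option Int) : Prop := out = findStraight_alt hand
instance (hand : Int) (out : Option Int) : Decidable (Spec_findStraight hand out) := by unfold Spec_findStraight; infer_instance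

-- ===== CLAIM (what is proved, stated in full; the proofs are below) =====
def Claim_equal_findStraight : Prop := ∀ (hand : Int), Dom_findStraight hand → Spec_findStraight hand (findStraight hand)

-- ===== LEMMAS AND PROOFS =====
-- Strategy: both ports inspect hand only through its low 13 bits. Each port is bridged to a
-- Nat-level mirror (natA/natC for A on non-negative/negative inputs, natBh for B), the mirrors
-- are reduced modulo 8192, and the 8192 residues of each sign are checked by kernel evaluation.

theorem pvBandOfNat (n : Nat) (c : Int) (h0 : 0 ≤ c) :
    PySem.Int.band (Int.ofNat n) c = Int.ofNat (n &&& c.toNat) := by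
  simp [PySem.Int.band, h0]

theorem pvBandNegSucc (n : Nat) (c : Int) (h0 : 0 ≤ c) :
    PySem.Int.band (Int.negSucc n) c = Int.ofNat (c.toNat - (c.toNat &&& n)) := by
  simp [PySem.Int.band, h0]

-- Nat-level mirrors used only by the proofs
def natLoopA (r : Nat) : List Int → Option Int
  | [] => none
  | i :: rest => if r &&& (31 <<< i.toNat) = 31 <<< i.toNat then some (8 - i) else natLoopA r rest

def natA (r : Nat) : Option Int :=
  match natLoopA r [8,7,6,5,4,3,2,1,0] with
  | some v => some v
  | none => if r &&& 15 = 15 then if r &&& 4096 ≠ 0 then some 9 else none else none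

def natLoopC (n : Nat) : List Int → Option Int
  | [] => none
  | i :: rest => if 31 <<< i.toNat - (31 <<< i.toNat &&& n) = 31 <<< i.toNat then some (8 - i) else natLoopC n rest

def natC (n : Nat) : Option Int :=
  match natLoopC n [8,7,6,5,4,3,2,1,0] with
  | some v => some v
  | none => if 15 - (15 &&& n) = 15 then if 4096 - (4096 &&& n) ≠ 0 then some 9 else none else none

def natBh (h : Nat) : Option Int :=
  let m := h &&& (h >>> 1) &&& (h >>> 2) &&& (h >>> 3) &&& (h >>> 4)
  if m ≠ 0 then some (8 - ((PySem.Int.bitLength (Int.ofNat m) : Int) - 1))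
  else if h &&& 15 = 15 ∧ h &&& 4096 ≠ 0 then some 9
  else none

theorem pvLoopA_bridge (r : Nat) (l : List Int) : fsLoop (Int.ofNat r) l = natLoopA r l := by
  induction l with
  | nil => rfl
  | cons i rest ih =>
    have hb : PySem.Int.band (Int.ofNat r) ((31 <<< i.toNat : Nat) : Int) = ((r &&& (31 <<< i.toNat) : Nat) : Int) := by
      rw [pvBandOfNat r _ (Int.natCast_nonneg _)]
      rfl
    rw [fsLoop, natLoopA, ih, hb]
    simp only [Int.natCast_inj]

theorem pvA_bridge (r : Nat) : findStraight (Int.ofNat r) = natA r := by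
  unfold findStraight natA
  rw [show (PySem.List.pyRange 0 9 1).reverse = [8,7,6,5,4,3,2,1,0] from by decide,
      pvLoopA_bridge]
  rw [pvBandOfNat r 15 (by norm_num), pvBandOfNat r 4096 (by norm_num)]
  simp only [Int.ofNat_eq_natCast, show (15:Int).toNat = 15 from rfl, show (4096:Int).toNat = 4096 from rfl,
    ne_eq, Int.natCast_eq_zero]
  norm_cast

theorem pvLoopC_bridge (n : Nat) (l : List Int) : fsLoop (Int.negSucc n) l = natLoopC n l := by
  induction l with
  | nil => rfl
  | cons i rest ih =>
    have hb : PySem.Int.band (Int.negSucc n) ((31 <<< i.toNat : Nat) : Int)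
        = ((31 <<< i.toNat - (31 <<< i.toNat &&& n) : Nat) : Int) := by
      rw [pvBandNegSucc n _ (Int.natCast_nonneg _)]
      rfl
    rw [fsLoop, natLoopC, ih, hb]
    simp only [Int.natCast_inj]

theorem pvC_bridge (n : Nat) : findStraight (Int.negSucc n) = natC n := by
  unfold findStraight natC
  rw [show (PySem.List.pyRange 0 9 1).reverse = [8,7,6,5,4,3,2,1,0] from by decide,
      pvLoopC_bridge]
  rw [pvBandNegSucc n 15 (by norm_num), pvBandNegSucc n 4096 (by norm_num)]
  simp only [Int.ofNat_eq_natCast, show (15:Int).toNat = 15 from rfl, show (4096:Int).toNat = 4096 from rfl,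
    ne_eq, Int.natCast_eq_zero]
  norm_cast

theorem pvBandCast (x y : Nat) :
    PySem.Int.band ((x : Nat) : Int) ((y : Nat) : Int) = ((x &&& y : Nat) : Int) := by
  rw [show ((x:Nat):Int) = Int.ofNat x from rfl, pvBandOfNat x _ (Int.natCast_nonneg _)]
  rfl

theorem pvB_bridge (r : Nat) : findStraight_alt (Int.ofNat r) = natBh (r &&& 8191) := by
  simp only [findStraight_alt, natBh]
  rw [show PySem.Int.band (Int.ofNat r) 8191 = ((r &&& 8191 : Nat) : Int) from by
        rw [pvBandOfNat r 8191 (by norm_num)]; rfl]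
  simp only [show ∀ (x : Nat), ((x:Nat):Int) >>> (1:Int) = ((x >>> 1 : Nat):Int) from fun _ => rfl,
    show ∀ (x : Nat), ((x:Nat):Int) >>> (2:Int) = ((x >>> 2 : Nat):Int) from fun _ => rfl,
    show ∀ (x : Nat), ((x:Nat):Int) >>> (3:Int) = ((x >>> 3 : Nat):Int) from fun _ => rfl,
    show ∀ (x : Nat), ((x:Nat):Int) >>> (4:Int) = ((x >>> 4 : Nat):Int) from fun _ => rfl,
    pvBandCast]
  rw [show ∀ x : Nat, PySem.Int.band ((x:Nat):Int) 15 = ((x &&& 15 : Nat):Int) from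
        fun x => pvBandCast x 15,
      show ∀ x : Nat, PySem.Int.band ((x:Nat):Int) 4096 = ((x &&& 4096 : Nat):Int) from
        fun x => pvBandCast x 4096]
  simp only [ne_eq, Int.natCast_eq_zero, Int.ofNat_eq_natCast]
  norm_cast

theorem pvD_bridge (n : Nat) : findStraight_alt (Int.negSucc n) = natBh (8191 - (8191 &&& n)) := by
  simp only [findStraight_alt, natBh]
  rw [show PySem.Int.band (Int.negSucc n) 8191 = ((8191 - (8191 &&& n) : Nat) : Int) from by
        rw [pvBandNegSucc n 8191 (by norm_num)]; rfl]
  simp only [show ∀ (x : Nat), ((x:Nat):Int) >>> (1:Int) = ((x >>> 1 : Nat):Int) from fun _ => rfl,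
    show ∀ (x : Nat), ((x:Nat):Int) >>> (2:Int) = ((x >>> 2 : Nat):Int) from fun _ => rfl,
    show ∀ (x : Nat), ((x:Nat):Int) >>> (3:Int) = ((x >>> 3 : Nat):Int) from fun _ => rfl,
    show ∀ (x : Nat), ((x:Nat):Int) >>> (4:Int) = ((x >>> 4 : Nat):Int) from fun _ => rfl,
    pvBandCast]
  rw [show ∀ x : Nat, PySem.Int.band ((x:Nat):Int) 15 = ((x &&& 15 : Nat):Int) from
        fun x => pvBandCast x 15,
      show ∀ x : Nat, PySem.Int.band ((x:Nat):Int) 4096 = ((x &&& 4096 : Nat):Int) from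
        fun x => pvBandCast x 4096]
  simp only [ne_eq, Int.natCast_eq_zero, Int.ofNat_eq_natCast]
  norm_cast

theorem pvNatAndMod (n c : Nat) (hc : c < 8192) : n &&& c = (n % 8192) &&& c := by
  apply Nat.eq_of_testBit_eq; intro i
  rw [Nat.testBit_and, Nat.testBit_and, show (8192:Nat) = 2^13 from rfl, Nat.testBit_mod_two_pow]
  by_cases h : i < 13
  · simp [h]
  · have hle : (8192:Nat) ≤ 2^i := by
      calc (8192:Nat) = 2^13 := rfl
        _ ≤ 2^i := Nat.pow_le_pow_right (by norm_num) (by omega)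
    have : c.testBit i = false := Nat.testBit_lt_two_pow (lt_of_lt_of_le hc hle)
    simp [this]

theorem pvLoopA_mod (r : Nat) :
    ∀ (l : List Int), (∀ i ∈ l, 0 ≤ i ∧ i ≤ 8) → natLoopA r l = natLoopA (r % 8192) l := by
  intro l hl
  induction l with
  | nil => rfl
  | cons i rest ih =>
    have hi := hl i (by simp)
    have hk : i.toNat ≤ 8 := by omega
    have hc : (31 <<< i.toNat : Nat) < 8192 := by
      set k := i.toNat with hkdef
      interval_cases k <;> decide
    rw [natLoopA, natLoopA, pvNatAndMod r _ hc, ih (fun j hj => hl j (by simp [hj]))]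

theorem pvA_mod (r : Nat) : natA r = natA (r % 8192) := by
  unfold natA
  rw [pvLoopA_mod r _ (by decide), pvNatAndMod r 15 (by norm_num), pvNatAndMod r 4096 (by norm_num)]

theorem pvLoopC_mod (n : Nat) :
    ∀ (l : List Int), (∀ i ∈ l, 0 ≤ i ∧ i ≤ 8) → natLoopC n l = natLoopC (n % 8192) l := by
  intro l hl
  induction l with
  | nil => rfl
  | cons i rest ih =>
    have hi := hl i (by simp)
    have hk : i.toNat ≤ 8 := by omega
    have hc : (31 <<< i.toNat : Nat) < 8192 := by
      set k := i.toNat with hkdef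
      interval_cases k <;> decide
    rw [natLoopC, natLoopC, Nat.land_comm _ n, pvNatAndMod n _ hc, Nat.land_comm,
        ih (fun j hj => hl j (by simp [hj]))]

theorem pvC_mod (n : Nat) : natC n = natC (n % 8192) := by
  unfold natC
  rw [pvLoopC_mod n _ (by decide),
      show (15 &&& n) = 15 &&& (n % 8192) from by
        rw [Nat.land_comm, pvNatAndMod n 15 (by norm_num), Nat.land_comm],
      show (4096 &&& n) = 4096 &&& (n % 8192) from by
        rw [Nat.land_comm, pvNatAndMod n 4096 (by norm_num), Nat.land_comm]]

set_option maxRecDepth 20000 in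
set_option maxHeartbeats 4000000 in
theorem pvSweepPos :
    ((List.range 8192).all (fun r => natA r == natBh (r &&& 8191))) = true := by decide

set_option maxRecDepth 20000 in
set_option maxHeartbeats 4000000 in
theorem pvSweepNeg :
    ((List.range 8192).all (fun n => natC n == natBh (8191 - (8191 &&& n)))) = true := by decide

theorem pvFinal : ∀ hand : Int, findStraight hand = findStraight_alt hand := by
  intro hand
  cases hand with
  | ofNat n =>
    have hmem : n % 8192 ∈ List.range 8192 := List.mem_range.mpr (Nat.mod_lt _ (by norm_num))
    have h := eq_of_beq (List.all_eq_true.mp pvSweepPos _ hmem)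
    rw [pvA_bridge, pvB_bridge, pvA_mod, pvNatAndMod n 8191 (by norm_num), h]
  | negSucc n =>
    have hmem : n % 8192 ∈ List.range 8192 := List.mem_range.mpr (Nat.mod_lt _ (by norm_num))
    have h := eq_of_beq (List.all_eq_true.mp pvSweepNeg _ hmem)
    rw [pvC_bridge, pvD_bridge, pvC_mod,
        show (8191 &&& n) = 8191 &&& (n % 8192) from by
          rw [Nat.land_comm, pvNatAndMod n 8191 (by norm_num), Nat.land_comm],
        h]

-- ===== VERDICT (by name: the statement is the Claim_ definition above) =====
theorem findStraight_spec : Claim_equal_findStraight := by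
  intro hand _
  unfold Spec_findStraight
  exact pvFinal hand
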